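-- pv_equiv track=rewrite | github.com/noahdominic/aoc24 | aoc07.py | perform_concatenation
-- ===== SOURCE A (Python) =====
-- def perform_concatenation(numbers, operations):
--     new_numbers = []
--
--     concat_buffer = numbers [0]
--
--     for i, number in enumerate(numbers[1:]):
--         if operations[i] == 2:
--             concat_buffer += number
--         else:
--             new_numbers.append(concat_buffer)
--             concat_buffer = number
--
--     if not concat_buffer == "":
--         new_numbers.append(concat_buffer)
--
--     return new_numbers, [i for i in operations if i != 2]
-- ===== SOURCE B (Python) =====
-- def perform_concatenation(numbers, operations):
--     # Segment-wise recursion: skip ahead over each run of concat (2) markers,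
--     # join that whole slice at once, and recurse on the remainder.
--     ops = operations[:len(numbers) - 1]
--
--     def rec(nums, ops):
--         k = 0
--         while k < len(ops) and ops[k] == 2:
--             k += 1
--         piece = "".join(nums[:k + 1])
--         if k >= len(ops):
--             return [piece] if piece != "" else []
--         return [piece] + rec(nums[k + 1:], ops[k + 1:])
--
--     return rec(numbers, ops), [op for op in operations if op != 2]
-- ===== Notes on version B (the rewrite author's own statement) =====
-- stated objective: alternative
-- what changed: B replaces A's element-by-element pass with a running concat-buffer by a segment-wise recursion: it skips ahead over each run of concat (2) markers, joins that whole slice of numbers at once, and recurses on the remaining slices.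
import Mathlib
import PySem

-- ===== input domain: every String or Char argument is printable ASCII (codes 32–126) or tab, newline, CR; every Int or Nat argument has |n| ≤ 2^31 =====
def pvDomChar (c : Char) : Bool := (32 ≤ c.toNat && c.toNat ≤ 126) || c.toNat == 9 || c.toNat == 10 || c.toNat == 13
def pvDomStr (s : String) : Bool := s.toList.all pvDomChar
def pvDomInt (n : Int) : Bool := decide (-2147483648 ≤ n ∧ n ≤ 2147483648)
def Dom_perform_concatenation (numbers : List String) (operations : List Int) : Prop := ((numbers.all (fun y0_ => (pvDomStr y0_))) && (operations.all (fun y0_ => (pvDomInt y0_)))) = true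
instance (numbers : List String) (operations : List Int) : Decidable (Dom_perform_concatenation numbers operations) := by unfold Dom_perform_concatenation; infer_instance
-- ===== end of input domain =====

-- B replaces A's element-by-element buffered pass by a segment-wise recursion that
-- skips each run of concat (2) markers and joins the slice at once (alternative
-- decomposition, same cost; return values proved equal wherever A returns).

-- ===== PORT A =====
-- A's loop body: flush the buffer into new_numbers unless operations[i] == 2.
def pcStepA (operations : List Int) (st : List String × String) (iv : Int × String) : List String × String :=
  if PySem.List.pyGetD operations iv.1 0 = 2 then   -- operations[i]; out of range is excluded by Pre_
    (st.1, st.2 ++ iv.2)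
  else
    (st.1 ++ [st.2], iv.2)

-- A's trailing "if not concat_buffer == '': append" statement.
def pcFlush (st : List String × String) : List String :=
  if ¬ st.2 = "" then st.1 ++ [st.2] else st.1

def perform_concatenation (numbers : List String) (operations : List Int) : List String × List Int :=
  (pcFlush ((PySem.List.enumerate (PySem.List.slice numbers (some 1) none)).foldl
      (pcStepA operations)
      (([] : List String), PySem.List.pyGetD numbers 0 "")),   -- numbers[0]; IndexError on [] excluded by Pre_
   operations.filter (fun i => i ≠ 2))

-- ===== PORT B =====
-- Source B's inner while loop: advance k over the leading run of 2s from position k.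
def pcFindK (ops : List Int) (k : Nat) : Nat :=
  if h : k < ops.length then
    (if ops[k] = 2 then pcFindK ops (k + 1) else k)
  else k
termination_by ops.length - k

-- Source B's recursive helper `rec`.
def pcRecB (nums : List String) (ops : List Int) : List String :=
  let k := pcFindK ops 0
  let piece := PySem.Str.join "" (PySem.List.slice nums none (some ((k : Int) + 1)))   -- "".join(nums[:k+1])
  if h : ops.length ≤ k then
    (if piece ≠ "" then [piece] else [])
  else
    piece :: pcRecB (PySem.List.slice nums (some ((k : Int) + 1)) none)
                    (PySem.List.slice ops (some ((k : Int) + 1)) none)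
termination_by ops.length
decreasing_by
  rw [show ((pcFindK ops 0 : Int) + 1) = ((pcFindK ops 0 + 1 : Nat) : Int) by push_cast; ring,
      PySem.List.slice_from_natCast]
  simp only [List.length_drop]
  omega

def perform_concatenation_alt (numbers : List String) (operations : List Int) : List String × List Int :=
  (pcRecB numbers (PySem.List.slice operations none (some ((numbers.length : Int) - 1))),  -- operations[:len(numbers)-1]
   operations.filter (fun op => op ≠ 2))

-- ===== PRECONDITION & SPEC =====
-- Pre_ excludes exactly the inputs on which the Python A raises IndexError:
-- empty `numbers` (numbers[0]) and `operations` shorter than len(numbers) - 1 (operations[i]).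
def Pre_perform_concatenation (numbers : List String) (operations : List Int) : Prop :=
  numbers ≠ [] ∧ numbers.length ≤ operations.length + 1
instance (numbers : List String) (operations : List Int) : Decidable (Pre_perform_concatenation numbers operations) := by unfold Pre_perform_concatenation; infer_instance

def pvWitness_perform_concatenation : List String × List Int := (["1", "2", "3"], [2, 1, 0])

def Spec_perform_concatenation (numbers : List String) (operations : List Int) (out : List String × List Int) : Prop := out = perform_concatenation_alt numbers operations
instance (numbers : List String) (operations : List Int) (out : List String × List Int) : Decidable (Spec_perform_concatenation numbers operations out) := by unfold Spec_perform_concatenation; infer_instance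

-- ===== CLAIM (what is proved, stated in full; the proofs are below) =====
def Claim_equal_perform_concatenation : Prop := ∀ (numbers : List String) (operations : List Int), Dom_perform_concatenation numbers operations → Pre_perform_concatenation numbers operations → Spec_perform_concatenation numbers operations (perform_concatenation numbers operations)

-- ===== LEMMAS AND PROOFS =====

/-- A's loop body with the operation value already looked up (proof-side reshaping). -/
def pcStepZ (st : List String × String) (on_ : Int × String) : List String × String :=
  if on_.1 = 2 then (st.1, st.2 ++ on_.2) else (st.1 ++ [st.2], on_.2)

/-- `"".join` over `List Char` is `flatten`. -/
theorem pc_join_flatten (parts : List (List Char)) : PySem.Chars.join [] parts = parts.flatten := by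
  induction parts with
  | nil => rfl
  | cons a t ih =>
    cases t with
    | nil => simp [PySem.Chars.join_singleton]
    | cons b r => rw [PySem.Chars.join_cons_cons]; simp_all

theorem pc_join_singleton (x : String) : PySem.Str.join "" [x] = x := by
  rw [← String.toList_inj]; simp [pysem]

theorem pc_join_cons (x : String) (g : List String) :
    PySem.Str.join "" (x :: g) = x ++ PySem.Str.join "" g := by
  rw [← String.toList_inj]; simp [pysem, pc_join_flatten]

/-- Fuelled form of the next lemma, for induction. -/
theorem pc_findK_aux (ops : List Int) (n : Nat) : ∀ k, ops.length - k ≤ n →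
    pcFindK ops k = k + ((ops.drop k).takeWhile (fun o => o == 2)).length := by
  induction n with
  | zero =>
    intro k hk
    rw [pcFindK, dif_neg (by omega), List.drop_eq_nil_of_le (by omega)]
    simp
  | succ n ih =>
    intro k hk
    by_cases h : k < ops.length
    · rw [pcFindK, dif_pos h]
      have hdrop : ops.drop k = ops[k] :: ops.drop (k + 1) := List.drop_eq_getElem_cons h
      by_cases h2 : ops[k] = 2
      · rw [if_pos h2, ih (k + 1) (by omega), hdrop]
        simp [h2]
        omega
      · rw [if_neg h2, hdrop]
        simp [h2]
    · rw [pcFindK, dif_neg h, List.drop_eq_nil_of_le (by omega)]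
      simp

/-- `pcFindK` counts the run of 2s starting at `k`. -/
theorem pc_findK_eq (ops : List Int) (k : Nat) :
    pcFindK ops k = k + ((ops.drop k).takeWhile (fun o => o == 2)).length :=
  pc_findK_aux ops ops.length k (by omega)

theorem pc_findK_nil : pcFindK [] 0 = 0 := by rw [pcFindK]; simp

theorem pc_findK_two (ot : List Int) : pcFindK (2 :: ot) 0 = pcFindK ot 0 + 1 := by
  rw [pc_findK_eq, pc_findK_eq]
  simp

theorem pc_findK_ne (o : Int) (ot : List Int) (h : ¬ o = 2) : pcFindK (o :: ot) 0 = 0 := by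
  rw [pc_findK_eq]
  simp [h]

/-- Base case of the segment recursion. -/
theorem pc_recB_nil (cb : String) :
    pcRecB [cb] [] = if ¬ cb = "" then [cb] else [] := by
  rw [pcRecB]
  simp only [pc_findK_nil, List.length_nil, Nat.le_refl, dif_pos]
  have : PySem.List.slice [cb] none (some ((0 : Nat) + 1 : Int)) = [cb] := by
    simpa using PySem.List.slice_to_natCast [cb] 1
  rw [show ((0 : Nat) : Int) + 1 = ((1 : Nat) : Int) by norm_num] at this ⊢
  rw [PySem.List.slice_to_natCast]
  simp [pc_join_singleton cb]

/-- Merging step: a leading 2 merges the first two numbers. -/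
theorem pc_recB_two (a b : String) (rest : List String) (ot : List Int) :
    pcRecB (a :: b :: rest) (2 :: ot) = pcRecB ((a ++ b) :: rest) ot := by
  rw [pcRecB]
  conv_rhs => rw [pcRecB]
  simp only [pc_findK_two]
  set k := pcFindK ot 0 with hk
  have hsl1 : PySem.List.slice (a :: b :: rest) none (some ((k + 1 : Nat) + 1 : Int)) =
      a :: b :: rest.take k := by
    rw [show ((k + 1 : Nat) : Int) + 1 = ((k + 2 : Nat) : Int) by push_cast; ring]
    rw [PySem.List.slice_to_natCast]
    simp [List.take_succ_cons]
  have hsl2 : PySem.List.slice ((a ++ b) :: rest) none (some ((k : Nat) + 1 : Int)) =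
      (a ++ b) :: rest.take k := by
    rw [show ((k : Nat) : Int) + 1 = ((k + 1 : Nat) : Int) by push_cast; ring]
    rw [PySem.List.slice_to_natCast]
    simp [List.take_succ_cons]
  have hpiece : PySem.Str.join "" (a :: b :: rest.take k) =
      PySem.Str.join "" ((a ++ b) :: rest.take k) := by
    rw [pc_join_cons, pc_join_cons, pc_join_cons]
    rw [String.append_assoc]
  have hdrop1 : PySem.List.slice (a :: b :: rest) (some ((k + 1 : Nat) + 1 : Int)) none =
      rest.drop k := by
    rw [show ((k + 1 : Nat) : Int) + 1 = ((k + 2 : Nat) : Int) by push_cast; ring]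
    rw [PySem.List.slice_from_natCast]
    simp
  have hdrop2 : PySem.List.slice ((a ++ b) :: rest) (some ((k : Nat) + 1 : Int)) none =
      rest.drop k := by
    rw [show ((k : Nat) : Int) + 1 = ((k + 1 : Nat) : Int) by push_cast; ring]
    rw [PySem.List.slice_from_natCast]
    simp
  have hodrop1 : PySem.List.slice (2 :: ot) (some ((k + 1 : Nat) + 1 : Int)) none =
      ot.drop (k + 1) := by
    rw [show ((k + 1 : Nat) : Int) + 1 = ((k + 2 : Nat) : Int) by push_cast; ring]
    rw [PySem.List.slice_from_natCast]
    simp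
  have hodrop2 : PySem.List.slice ot (some ((k : Nat) + 1 : Int)) none = ot.drop (k + 1) := by
    rw [show ((k : Nat) : Int) + 1 = ((k + 1 : Nat) : Int) by push_cast; ring]
    rw [PySem.List.slice_from_natCast]
  simp only [hsl1, hsl2, hpiece, hdrop1, hdrop2, hodrop1, hodrop2, List.length_cons]
  by_cases hle : ot.length ≤ k
  · rw [dif_pos (by omega), dif_pos hle]
  · rw [dif_neg (by omega), dif_neg hle]

/-- Splitting step: a leading non-2 emits the first number as its own piece. -/
theorem pc_recB_ne (cb n : String) (lt : List String) (o : Int) (ot : List Int) (ho : ¬ o = 2) :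
    pcRecB (cb :: n :: lt) (o :: ot) = cb :: pcRecB (n :: lt) ot := by
  rw [pcRecB]
  simp only [pc_findK_ne o ot ho, List.length_cons]
  rw [dif_neg (by omega)]
  have hsl : PySem.List.slice (cb :: n :: lt) none (some ((0 : Nat) + 1 : Int)) = [cb] := by
    rw [show ((0 : Nat) : Int) + 1 = ((1 : Nat) : Int) by norm_num]
    rw [PySem.List.slice_to_natCast]
    simp
  have hdropn : PySem.List.slice (cb :: n :: lt) (some ((0 : Nat) + 1 : Int)) none = n :: lt := by
    rw [show ((0 : Nat) : Int) + 1 = ((1 : Nat) : Int) by norm_num]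
    rw [PySem.List.slice_from_natCast]
    simp
  have hdropo : PySem.List.slice (o :: ot) (some ((0 : Nat) + 1 : Int)) none = ot := by
    rw [show ((0 : Nat) : Int) + 1 = ((1 : Nat) : Int) by norm_num]
    rw [PySem.List.slice_from_natCast]
    simp
  rw [hsl, hdropn, hdropo, pc_join_singleton]

/-- Main simulation: A's buffered zip-fold equals B's segment recursion. -/
theorem pc_main (ops : List Int) : ∀ (l : List String), ops.length = l.length →
    ∀ (nn : List String) (cb : String),
    pcFlush ((List.zip ops l).foldl pcStepZ (nn, cb)) = nn ++ pcRecB (cb :: l) ops := by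
  induction ops with
  | nil =>
    intro l hl nn cb
    cases l with
    | nil =>
      simp only [List.zip_nil_left, List.foldl_nil]
      rw [pc_recB_nil, pcFlush]
      split_ifs <;> simp
    | cons x xs => simp at hl
  | cons o ot ih =>
    intro l hl nn cb
    cases l with
    | nil => simp at hl
    | cons n lt =>
      simp only [List.zip_cons_cons, List.foldl_cons]
      by_cases ho : o = 2
      · rw [pcStepZ, if_pos ho]
        rw [ih lt (by simpa using hl) nn (cb ++ n)]
        rw [ho, pc_recB_two]
      · rw [pcStepZ, if_neg ho]
        rw [ih lt (by simpa using hl) (nn ++ [cb]) n]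
        rw [pc_recB_ne cb n lt o ot ho]
        simp
  
/-- A's enumerate-fold with absolute lookups equals a zip-fold with the looked-up values. -/
theorem pc_enum (ops : List Int) : ∀ (l : List String) (s : Nat), s + l.length ≤ ops.length →
    ∀ (st : List String × String),
    (PySem.List.enumerate l (s : Int)).foldl (pcStepA ops) st =
      (List.zip (ops.drop s) l).foldl pcStepZ st := by
  intro l
  induction l with
  | nil => intro s _ st; simp [PySem.List.enumerate_nil]
  | cons n lt ih =>
    intro s hs st
    have hslt : s < ops.length := by simp at hs; omega
    rw [PySem.List.enumerate_cons]
    rw [List.drop_eq_getElem_cons hslt]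
    simp only [List.zip_cons_cons, List.foldl_cons]
    have hstep : pcStepA ops st ((s : Int), n) = pcStepZ st (ops[s], n) := by
      rw [pcStepA, pcStepZ]
      have : PySem.List.pyGetD ops ((s : Int)) 0 = ops[s] :=
        PySem.List.pyGetD_ofNat ops s 0 hslt
      simp [this]
    rw [hstep]
    have : (s : Int) + 1 = ((s + 1 : Nat) : Int) := by push_cast; ring
    rw [this, ih (s + 1) (by simp at hs ⊢; omega)]

/-- zipping truncates the left list. -/
theorem pc_zip_take {α β : Type} (xs : List α) (ys : List β) :
    List.zip xs ys = List.zip (xs.take ys.length) ys := by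
  induction xs generalizing ys with
  | nil => simp
  | cons x xt ih =>
    cases ys with
    | nil => simp
    | cons y yt => simp [List.zip_cons_cons, ih yt]

-- ===== VERDICT =====
theorem perform_concatenation_spec : Claim_equal_perform_concatenation := by
  unfold Claim_equal_perform_concatenation
  intro numbers operations _ hpre
  obtain ⟨hne, hlen⟩ := hpre
  unfold Spec_perform_concatenation perform_concatenation perform_concatenation_alt
  cases numbers with
  | nil => exact absurd rfl hne
  | cons n0 rest =>
    have hops : operations.length ≥ rest.length := by simp at hlen; omega
    -- B's ops prefix
    have hslice_ops : PySem.List.slice operations none (some (((n0 :: rest).length : Int) - 1)) =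
        operations.take rest.length := by
      rw [show (((n0 :: rest).length : Int) - 1) = ((rest.length : Nat) : Int) by simp]
      exact PySem.List.slice_to_natCast operations rest.length
    -- A's tail slice and first element
    have hslice_nums : PySem.List.slice (n0 :: rest) (some 1) none = rest := by
      rw [show (1 : Int) = ((1 : Nat) : Int) by norm_num, PySem.List.slice_from_natCast]
      simp
    have hget0 : PySem.List.pyGetD (n0 :: rest) 0 "" = n0 := PySem.List.pyGetD_zero_cons n0 rest ""
    rw [hslice_ops, hslice_nums, hget0]
    have henum := pc_enum operations rest 0 (by omega) (([] : List String), n0)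
    rw [show ((0 : Nat) : Int) = (0 : Int) by norm_num] at henum
    rw [henum, List.drop_zero]
    rw [pc_zip_take operations rest]
    rw [pc_main (operations.take rest.length) rest (by simp [List.length_take]; omega) [] n0]
    simp
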